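-- pv_equiv track=rewrite | github.com/jjbankert/advent_of_code | aoc_2020/10_adapter_array.py | get_subsection_variations
-- ===== SOURCE A (Python) =====
-- from itertools import combinations
--
-- def get_subsection_variations(chain: list[int]) -> list[list[int]]:
--     if len(chain) == 1:
--         return [chain]
--
--     start = chain[0]
--     middle_chain = chain[1:-1]
--     end = chain[-1]
--
--     variations = [[start, end]]
--     for length in range(1, len(middle_chain)):
--         for combination in combinations(middle_chain, length):
--             variation = [start] + list(combination) + [end]
--             if is_valid_chain(variation):
--                 variations.append(variation)
--
--     return variations
--
-- def is_valid_chain(chain: list[int]) -> bool: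
--     return all(higher - lower <= 3 for lower, higher in zip(chain[:-1], chain[1:]))
-- ===== SOURCE B (Python) =====
-- def _ext(last, middle):
--     # non-empty sub-chains of `middle` that validly extend `last`
--     # (every consecutive gap <= 3), in lexicographic index order
--     if not middle:
--         return []
--     x, rest = middle[0], middle[1:]
--     out = []
--     if x - last <= 3:
--         for tail in [[]] + _ext(x, rest):
--             out.append([x] + tail)
--     out.extend(_ext(last, rest))
--     return out
--
-- def get_subsection_variations(chain: list[int]) -> list[list[int]]:
--     if len(chain) == 1:
--         return [chain]
--     start, end = chain[0], chain[-1]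
--     middle = chain[1:-1]
--     m = len(middle)
--     buckets = [[] for _ in range(m + 1)]
--     for comb in _ext(start, middle):
--         if len(comb) < m and end - comb[-1] <= 3:
--             buckets[len(comb)].append([start] + comb + [end])
--     res = [[start, end]]
--     for b in buckets:
--         res.extend(b)
--     return res
-- ===== Notes on version B (the rewrite author's own statement) =====
-- stated objective: faster
-- what changed: A enumerates every combination of the middle elements for each length and filters by validity (exponential in the middle length); B does a pruned DFS that only ever extends a partial sub-chain by elements within gap 3, then buckets the valid sub-chains by length, so invalid combinations are never generated.
-- outside the precondition, e.g. on get_subsection_variations([]): A raises IndexError, B raises IndexError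
import Mathlib
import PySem

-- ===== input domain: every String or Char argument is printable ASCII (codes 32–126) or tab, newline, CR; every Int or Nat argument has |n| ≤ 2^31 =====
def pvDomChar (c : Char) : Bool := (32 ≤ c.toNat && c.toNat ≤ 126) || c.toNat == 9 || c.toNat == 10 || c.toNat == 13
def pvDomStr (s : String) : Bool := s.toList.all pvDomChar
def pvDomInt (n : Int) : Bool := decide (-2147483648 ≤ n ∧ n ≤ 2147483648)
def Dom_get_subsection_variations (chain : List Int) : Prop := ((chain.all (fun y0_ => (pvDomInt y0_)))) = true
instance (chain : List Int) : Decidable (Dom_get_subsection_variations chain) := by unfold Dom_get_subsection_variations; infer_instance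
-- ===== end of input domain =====

-- B replaces A's exhaustive enumerate-all-combinations-and-filter with a pruned DFS that only
-- extends partial sub-chains by elements within gap 3, bucketing the valid sub-chains by length
-- (objective: faster — invalid combinations are never generated).

-- ===== PORT A =====
def is_valid_chain (chain : List Int) : Bool :=
  -- all(higher - lower <= 3 for lower, higher in zip(chain[:-1], chain[1:]))
  (chain.dropLast.zip (chain.drop 1)).all (fun p => decide (p.2 - p.1 ≤ 3))

def get_subsection_variations (chain : List Int) : List (List Int) :=
  if chain.length = 1 then [chain] else
    let start := (PySem.List.pyGet? chain 0).getD 0          -- chain[0]; Pre_ excludes [], where Python raises IndexError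
    let middle_chain := (chain.drop 1).dropLast              -- chain[1:-1]
    let e := (PySem.List.pyGet? chain (-1)).getD 0           -- chain[-1]
    (PySem.List.pyRange 1 (middle_chain.length : Int)).foldl
      (fun variations len =>
        (PySem.List.combinations middle_chain len.toNat).foldl
          (fun variations combination =>
            let variation := start :: (combination ++ [e])
            if is_valid_chain variation then variations ++ [variation] else variations)
          variations)
      [[start, e]]

-- ===== PORT B =====
-- non-empty sub-chains of `middle` that validly extend `last` (every consecutive gap ≤ 3),
-- in lexicographic index order  (port of Source B's _ext)
def dfsExt : Int → List Int → List (List Int)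
  | _, [] => []
  | last, x :: rest =>
      (if x - last ≤ 3 then ((([] : List Int) :: dfsExt x rest).map (fun t => x :: t)) else [])
        ++ dfsExt last rest

def get_subsection_variations_alt (chain : List Int) : List (List Int) :=
  if chain.length = 1 then [chain] else
    let start := (PySem.List.pyGet? chain 0).getD 0          -- chain[0]; Pre_ excludes [], where Python raises IndexError
    let e := (PySem.List.pyGet? chain (-1)).getD 0           -- chain[-1]
    let middle := (chain.drop 1).dropLast                    -- chain[1:-1]
    let m := middle.length
    let buckets :=
      (dfsExt start middle).foldl
        (fun (bs : List (List (List Int))) comb =>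
          if comb.length < m ∧ e - (PySem.List.pyGet? comb (-1)).getD 0 ≤ 3 then
            bs.modify comb.length (fun b => b ++ [start :: (comb ++ [e])])
          else bs)
        (List.replicate (m + 1) [])
    buckets.foldl (fun res b => res ++ b) [[start, e]]

-- ===== PRECONDITION & SPEC =====
-- Pre_ excludes only the empty list, on which Python's A raises IndexError (chain[0]).
def Pre_get_subsection_variations (chain : List Int) : Prop := chain ≠ []
instance (chain : List Int) : Decidable (Pre_get_subsection_variations chain) := by
  unfold Pre_get_subsection_variations; infer_instance

def pvWitness_get_subsection_variations : List Int := [1, 2, 3]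

def Spec_get_subsection_variations (chain : List Int) (out : List (List Int)) : Prop := out = get_subsection_variations_alt chain
instance (chain : List Int) (out : List (List Int)) : Decidable (Spec_get_subsection_variations chain out) := by unfold Spec_get_subsection_variations; infer_instance

-- ===== CLAIM (what is proved, stated in full; the proofs are below) =====
def Claim_equal_get_subsection_variations : Prop := ∀ (chain : List Int), Dom_get_subsection_variations chain → Pre_get_subsection_variations chain → Spec_get_subsection_variations chain (get_subsection_variations chain)

-- ===== LEMMAS AND PROOFS =====

-- validity of a chain seen as the recursive gap check from its head
def prefOk : Int → List Int → Bool
  | _, [] => true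
  | last, x :: c => (decide (x - last ≤ 3)) && prefOk x c

lemma valid_eq_prefOk (c : List Int) : ∀ (last : Int), is_valid_chain (last :: c) = prefOk last c := by
  induction c with
  | nil => intro last; rfl
  | cons x c ih =>
    intro last
    have h2 := ih x
    cases c with
    | nil => simp [is_valid_chain, prefOk]
    | cons y c' =>
      simp only [is_valid_chain, prefOk, List.dropLast_cons₂, List.drop_succ_cons,
        List.drop_zero, List.zip_cons_cons, List.all_cons] at *
      rw [h2]

lemma prefOk_append (c : List Int) : ∀ (last e : Int),
    prefOk last (c ++ [e]) = (prefOk last c && decide (e - c.getLastD last ≤ 3)) := by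
  induction c with
  | nil => intro last e; simp [prefOk]
  | cons x c ih =>
    intro last e
    simp only [List.cons_append, prefOk, ih, List.getLastD_cons, Bool.and_assoc]

lemma dfsExt_ne_nil (xs : List Int) : ∀ (last : Int) (c : List Int), c ∈ dfsExt last xs → c ≠ [] := by
  induction xs with
  | nil => intro last c hc; simp [dfsExt] at hc
  | cons x rest ih =>
    intro last c hc
    simp only [dfsExt, List.mem_append] at hc
    rcases hc with hc | hc
    · by_cases h : x - last ≤ 3
      · rw [if_pos h] at hc
        simp only [List.mem_map] at hc
        obtain ⟨t, _, rfl⟩ := hc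
        simp
      · rw [if_neg h] at hc; simp at hc
    · exact ih last c hc

lemma dfsExt_filter_length (xs : List Int) : ∀ (last : Int) (k : Nat),
    (dfsExt last xs).filter (fun c => c.length == k + 1)
      = (PySem.List.combinations xs (k + 1)).filter (fun c => prefOk last c) := by
  induction xs with
  | nil => intro last k; rfl
  | cons x rest ih =>
    intro last k
    rw [dfsExt, PySem.List.combinations_cons_succ, List.filter_append, List.filter_append]
    congr 1
    · by_cases h : x - last ≤ 3
      · rw [if_pos h, List.filter_map, List.filter_map]
        have e1 : ((fun (c : List Int) => c.length == k + 1) ∘ (fun t => x :: t))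
            = (fun (t : List Int) => t.length == k) := by
          funext t; simp [Function.comp]
        have e2 : ((fun (c : List Int) => prefOk last c) ∘ (fun t => x :: t))
            = (fun (t : List Int) => prefOk x t) := by
          funext t; simp [Function.comp, prefOk, h]
        rw [e1, e2]
        cases k with
        | zero =>
          have hl : (dfsExt x rest).filter (fun t => t.length == 0) = [] := by
            rw [List.filter_eq_nil_iff]
            intro c hc
            have := dfsExt_ne_nil rest x c hc
            simp [List.length_eq_zero_iff, this]
          rw [PySem.List.combinations_zero]
          simp [hl, prefOk]
        | succ k' =>
          have : ((([] : List Int) :: dfsExt x rest).filter (fun t => t.length == k' + 1))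
              = (dfsExt x rest).filter (fun t => t.length == k' + 1) := by
            simp
          rw [this, ih x k']
      · rw [if_neg h, List.filter_map]
        have e2 : ((fun (c : List Int) => prefOk last c) ∘ (fun t => x :: t))
            = (fun (_ : List Int) => false) := by
          funext t; simp [Function.comp, prefOk, h]
        rw [e2]
        simp
    · exact ih last k

lemma bucket_getElem (g : List Int → List Int) (q : List Int → Bool) (L : List (List Int)) :
    ∀ (bs : List (List (List Int))) (j : Nat),
      (L.foldl (fun bs c => if q c then bs.modify c.length (fun b => b ++ [g c]) else bs) bs)[j]?
        = (bs[j]?).map (fun b => b ++ (L.filter (fun c => q c && (c.length == j))).map g) := by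
  induction L with
  | nil => intro bs j; simp
  | cons c L ih =>
    intro bs j
    rw [List.foldl_cons]
    by_cases hq : q c
    · rw [if_pos hq, ih, List.getElem?_modify]
      by_cases hj : c.length = j
      · subst hj
        simp only [List.filter_cons, hq, BEq.rfl, Bool.and_true, if_pos, List.map_cons]
        cases bs[c.length]? with
        | none => rfl
        | some b => simp
      · have hb : (q c && (c.length == j)) = false := by simp [hj]
        simp [hb, hj]
    · rw [if_neg hq, ih]
      have hb : (q c && (c.length == j)) = false := by simp [hq]
      simp [hb]

lemma buckets_eq (g : List Int → List Int) (q : List Int → Bool) (L : List (List Int)) (m : Nat) :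
    L.foldl (fun bs c => if q c then bs.modify c.length (fun b => b ++ [g c]) else bs)
        (List.replicate (m + 1) ([] : List (List Int)))
      = (List.range (m + 1)).map (fun j => (L.filter (fun c => q c && (c.length == j))).map g) := by
  apply List.ext_getElem?
  intro j
  rw [bucket_getElem, List.getElem?_map, List.getElem?_replicate]
  by_cases hj : j < m + 1
  · rw [if_pos hj, List.getElem?_range hj]
    simp
  · rw [if_neg hj]
    rw [List.getElem?_eq_none (by simpa using Nat.le_of_not_lt hj)]
    rfl

lemma pyGet_neg_one_cons (y : Int) (t : List Int) :
    (PySem.List.pyGet? (y :: t) (-1)).getD 0 = t.getLastD y := by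
  have h1 : PySem.List.pyGet? (y :: t) (-1) = (y :: t).getLast? := by
    simp [PySem.List.pyGet?, PySem.List.pyIdx?, List.getLast?_eq_getElem?]
  rw [h1, ← List.getLastD_eq_getLast?, List.getLastD_cons]

lemma pyRange_one_natCast (m : Nat) :
    PySem.List.pyRange 1 (m : Int) = (List.range (m - 1)).map (fun k : Nat => ((k : Int) + 1)) := by
  simp only [PySem.List.pyRange]
  norm_num
  by_cases h : 1 < m
  · rw [if_pos h]
    apply List.map_congr_left
    intro k _
    omega
  · rw [if_neg h]
    have h0 : m - 1 = 0 := by omega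
    simp [h0]

-- the B-side loop body, as named functions (used only in the proofs)
def gFn (s e : Int) (c : List Int) : List Int := s :: (c ++ [e])
def qFn (e : Int) (m : Nat) (c : List Int) : Bool :=
  decide (c.length < m ∧ e - (PySem.List.pyGet? c (-1)).getD 0 ≤ 3)

-- the heart of the equivalence, stated on the shared local values start/end/middle
lemma core (s e : Int) (mid : List Int) :
    (PySem.List.pyRange 1 (mid.length : Int)).foldl
      (fun variations len =>
        (PySem.List.combinations mid len.toNat).foldl
          (fun variations combination =>
            if is_valid_chain (s :: (combination ++ [e]))
            then variations ++ [s :: (combination ++ [e])] else variations)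
          variations)
      [[s, e]]
    =
    ((dfsExt s mid).foldl
        (fun (bs : List (List (List Int))) comb =>
          if comb.length < mid.length ∧ e - (PySem.List.pyGet? comb (-1)).getD 0 ≤ 3 then
            bs.modify comb.length (fun b => b ++ [s :: (comb ++ [e])])
          else bs)
        (List.replicate (mid.length + 1) [])).foldl (fun res b => res ++ b) [[s, e]] := by
  -- B side: the loop over the DFS output builds exactly the buckets, by index
  have hbuckets : (dfsExt s mid).foldl
      (fun (bs : List (List (List Int))) comb =>
        if comb.length < mid.length ∧ e - (PySem.List.pyGet? comb (-1)).getD 0 ≤ 3 then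
          bs.modify comb.length (fun b => b ++ [s :: (comb ++ [e])])
        else bs)
      (List.replicate (mid.length + 1) [])
      = (List.range (mid.length + 1)).map
          (fun j => ((dfsExt s mid).filter
              (fun c => qFn e mid.length c && (c.length == j))).map (gFn s e)) := by
    rw [← buckets_eq (gFn s e) (qFn e mid.length)]
    apply PySem.List.foldl_congr_mem
    intro acc c _
    by_cases h : c.length < mid.length ∧ e - (PySem.List.pyGet? c (-1)).getD 0 ≤ 3
    · rw [if_pos h, if_pos (by simpa [qFn] using h)]; rfl
    · rw [if_neg h, if_neg (by simpa [qFn] using h)]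
  rw [hbuckets, PySem.List.foldl_append_eq_flatten, ← List.flatMap_def]
  -- A side: the inner loop appends the valid variations of one length
  have hinner : ∀ (acc : List (List Int)) (len : Int),
      (PySem.List.combinations mid len.toNat).foldl
        (fun acc c => if is_valid_chain (s :: (c ++ [e])) then acc ++ [s :: (c ++ [e])] else acc) acc
      = acc ++ ((PySem.List.combinations mid len.toNat).filter
            (fun c => is_valid_chain (s :: (c ++ [e])))).map (gFn s e) :=
    fun acc len => PySem.List.foldl_append_if _ (gFn s e) _ acc
  rw [PySem.List.foldl_congr_mem (PySem.List.pyRange 1 (mid.length : Int)) _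
      (fun acc len => acc ++ ((PySem.List.combinations mid len.toNat).filter
          (fun c => is_valid_chain (s :: (c ++ [e])))).map (gFn s e)) [[s, e]]
      (fun acc x _ => hinner acc x)]
  rw [PySem.List.foldl_append_eq_flatMap, pyRange_one_natCast, List.flatMap_map]
  congr 1
  simp only [show ∀ a : Nat, ((a : Int) + 1).toNat = a + 1 from fun a => by omega]
  generalize mid.length = m
  -- peel off the (always empty) buckets 0 and m
  simp only [List.range_succ_eq_map, List.flatMap_cons, List.flatMap_map, Nat.succ_eq_add_one]
  have h0 : ((dfsExt s mid).filter (fun c => qFn e m c && (c.length == 0))).map (gFn s e) = [] := by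
    rw [List.map_eq_nil_iff, List.filter_eq_nil_iff]
    intro c hc
    have hne := dfsExt_ne_nil mid s c hc
    simp [List.length_eq_zero_iff, hne]
  rw [h0, List.nil_append]
  cases m with
  | zero => rfl
  | succ m' =>
    simp only [Nat.add_sub_cancel]
    rw [List.range_succ]
    simp only [List.flatMap_append, List.flatMap_singleton]
    have hm1 : ((dfsExt s mid).filter
        (fun c => qFn e (m' + 1) c && (c.length == m' + 1))).map (gFn s e) = [] := by
      rw [List.map_eq_nil_iff, List.filter_eq_nil_iff]
      intro c _
      by_cases hl : c.length = m' + 1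
      · simp [qFn, hl]
      · simp [hl]
    rw [hm1, List.append_nil]
    rw [List.flatMap_def, List.flatMap_def]
    congr 1
    apply List.map_congr_left
    intro k hk
    have hkm : k < m' := List.mem_range.mp hk
    -- one length bucket: DFS output filtered to length k+1 = filtered combinations
    rw [← List.filter_filter, dfsExt_filter_length mid s k, List.filter_filter]
    congr 1
    apply List.filter_congr
    intro c hc
    have hlen : c.length = k + 1 := PySem.List.length_of_mem_combinations hc
    obtain ⟨y, t, rfl⟩ : ∃ y t, c = y :: t := by
      cases c with
      | nil => simp at hlen
      | cons y t => exact ⟨y, t, rfl⟩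
    rw [valid_eq_prefOk, prefOk_append, List.getLastD_cons]
    have hlt : t.length < m' := by
      have h' := hlen
      simp only [List.length_cons] at h'
      omega
    simp only [qFn, pyGet_neg_one_cons]
    have hd : decide ((y :: t).length < m' + 1 ∧ e - t.getLastD y ≤ 3)
        = decide (e - t.getLastD y ≤ 3) := by
      simp [hlt]
    rw [hd, Bool.and_comm]

-- ===== VERDICT (by name: the statement is the Claim_ definition above) =====
theorem get_subsection_variations_spec : Claim_equal_get_subsection_variations := by
  intro chain _ _
  unfold Spec_get_subsection_variations
  unfold get_subsection_variations get_subsection_variations_alt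
  by_cases h : chain.length = 1
  · rw [if_pos h, if_pos h]
  · rw [if_neg h, if_neg h]
    exact core _ _ _
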